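-- pv_equiv track=rewrite | github.com/cybersubomi/Yahtzee | yahtzee2.py | num_of_a_kind
-- ===== SOURCE A (Python) =====
-- def num_of_a_kind(roll: tuple, number: int) -> int:
--     '''
--     If a roll has EXACTLY `number` dice of the same face value,
--     returns the sum of all five values in the roll.
--     Otherwise, returns 0.
--     '''
--     from collections import Counter
--     sum_value = 0
--     face_count = Counter(roll)
--     for key,value in face_count.items():      #sort key-value tuple pair into key value variable
--         if value == number:
--             for i in roll:                 #sum all values in tuple
--                 sum_value += i
--     return sum_value
-- ===== SOURCE B (Python) =====
-- def num_of_a_kind(roll: tuple, number: int) -> int: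
--     from collections import Counter
--     counts = Counter(roll)
--     matches = sum(1 for v in counts.values() if v == number)
--     return sum(roll) * matches
-- ===== Notes on version B (the rewrite author's own statement) =====
-- stated objective: simpler
-- what changed: Replaces A's nested loop (re-summing the whole roll once per face whose count equals number) by one Counter pass, a count of matching faces, and a single sum(roll)*matches multiplication.
import Mathlib
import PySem

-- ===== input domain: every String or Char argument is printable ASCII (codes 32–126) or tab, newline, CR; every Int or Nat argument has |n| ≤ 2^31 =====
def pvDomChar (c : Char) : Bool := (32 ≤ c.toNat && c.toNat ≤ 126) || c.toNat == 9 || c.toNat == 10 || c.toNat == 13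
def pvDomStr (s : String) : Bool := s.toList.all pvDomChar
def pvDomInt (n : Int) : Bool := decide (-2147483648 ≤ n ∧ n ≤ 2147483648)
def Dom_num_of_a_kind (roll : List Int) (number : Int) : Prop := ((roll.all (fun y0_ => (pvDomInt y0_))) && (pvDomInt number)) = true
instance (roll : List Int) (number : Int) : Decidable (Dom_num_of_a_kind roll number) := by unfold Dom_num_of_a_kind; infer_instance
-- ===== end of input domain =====

-- B replaces A's nested loop (re-summing the roll once per matching face) by counting matching faces once and a single multiplication: simpler, same cost.


-- ===== PORT A =====
def num_of_a_kind (roll : List Int) (number : Int) : Int :=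
  let face_count := PySem.Dict.counter roll
  face_count.items.foldl
    (fun sum_value kv =>
      if kv.2 == number then roll.foldl (fun s i => s + i) sum_value else sum_value)
    0

-- ===== PORT B =====
def num_of_a_kind_alt (roll : List Int) (number : Int) : Int :=
  let counts := PySem.Dict.counter roll
  let nMatches : Int := ((counts.values.filter (fun v => v == number)).length : Int)
  roll.sum * nMatches

-- ===== PRECONDITION & SPEC =====
def Spec_num_of_a_kind (roll : List Int) (number : Int) (out : Int) : Prop := out = num_of_a_kind_alt roll number
instance (roll : List Int) (number : Int) (out : Int) : Decidable (Spec_num_of_a_kind roll number out) := by unfold Spec_num_of_a_kind; infer_instance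

-- ===== CLAIM (what is proved, stated in full; the proofs are below) =====
def Claim_equal_num_of_a_kind : Prop := ∀ (roll : List Int) (number : Int), Dom_num_of_a_kind roll number → Spec_num_of_a_kind roll number (num_of_a_kind roll number)

-- ===== LEMMAS AND PROOFS =====

-- ===== VERDICT (by name: the statement is the Claim_ definition above) =====
theorem pv_foldl_match (number t : Int) :
    ∀ (l : List (Int × Int)) (init : Int),
      l.foldl (fun s kv => if kv.2 == number then s + t else s) init
        = init + t * ((l.filter (fun kv => kv.2 == number)).length : Int) := by
  intro l
  induction l with
  | nil => intro init; simp
  | cons kv rest ih =>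
    intro init
    by_cases h : (kv.2 == number) = true
    · simp only [List.foldl, h, if_true, ih, List.filter_cons]
      rw [List.length_cons]; push_cast; ring
    · simp only [List.foldl, h, if_false, Bool.false_eq_true, ih, List.filter_cons]

theorem pv_foldl_sum (roll : List Int) (init : Int) :
    roll.foldl (fun s i => s + i) init = init + roll.sum := by
  induction roll generalizing init with
  | nil => simp
  | cons x xs ih => simp [List.foldl, ih]; ring

theorem num_of_a_kind_spec : Claim_equal_num_of_a_kind := by
  intro roll number _
  unfold Spec_num_of_a_kind num_of_a_kind num_of_a_kind_alt
  have hcong : (PySem.Dict.counter roll).items.foldl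
      (fun sum_value kv => if kv.2 == number then roll.foldl (fun s i => s + i) sum_value else sum_value) (0:Int)
      = (PySem.Dict.counter roll).items.foldl
      (fun sum_value kv => if kv.2 == number then sum_value + roll.sum else sum_value) (0:Int) := by
    apply PySem.List.foldl_congr_mem
    intro s kv _
    by_cases h : kv.2 == number <;> simp [h, pv_foldl_sum]
  simp only [hcong, pv_foldl_match, zero_add]
  rw [show (PySem.Dict.counter roll).values = (PySem.Dict.counter roll).items.map (·.2) from rfl]
  rw [List.filter_map, List.length_map]
  congr 2
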